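-- pv_equiv track=rewrite | github.com/vincentiusmartin/chip2probe | util/bio.py | itoseq
-- ===== SOURCE A (Python) =====
-- def itoseq(seqint, kmer):
--     """Generate the sequence as a string from its integer representation."""
--     nucleotides = {0: 'A', 1: 'C', 2: 'G', 3: 'T'}
--     seq = ""
--     while(seqint > 0):
--         seq = nucleotides[seqint & 3] + seq
--         # perform bitwise right shift to get the next nucleotide
--         seqint >>= 2
--     # append 'A' to the left of the string until the desired length
--     if len(seq) < kmer:
--         seq = 'A' * (kmer - len(seq)) + seq
--     # return the sequence as a string
--     return seq
-- ===== SOURCE B (Python) =====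
-- def itoseq(seqint, kmer):
--     """Generate the sequence as a string from its integer representation."""
--     n = seqint if seqint > 0 else 0
--     digits, m = 0, n
--     while m > 0:
--         digits += 1
--         m >>= 2
--     length = max(kmer, digits)
--     return "".join("ACGT"[(n >> (2 * (length - 1 - i))) & 3] for i in range(length))
-- ===== Notes on version B (the rewrite author's own statement) =====
-- stated objective: alternative
-- what changed: B computes the output length up front (base-4 digit count vs kmer) and builds the string forward in one join by extracting each digit positionally, instead of consuming the integer with a prepend loop and then left-padding with 'A'.
import Mathlib
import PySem

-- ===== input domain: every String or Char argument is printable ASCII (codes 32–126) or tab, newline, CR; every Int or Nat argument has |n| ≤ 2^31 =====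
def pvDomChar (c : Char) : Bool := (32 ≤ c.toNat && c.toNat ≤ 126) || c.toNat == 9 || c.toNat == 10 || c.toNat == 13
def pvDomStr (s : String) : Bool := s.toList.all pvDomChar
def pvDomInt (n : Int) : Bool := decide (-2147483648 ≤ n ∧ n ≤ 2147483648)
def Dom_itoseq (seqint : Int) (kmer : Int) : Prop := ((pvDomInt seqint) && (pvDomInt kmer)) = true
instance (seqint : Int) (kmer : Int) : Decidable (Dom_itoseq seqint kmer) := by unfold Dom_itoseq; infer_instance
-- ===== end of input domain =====

-- B builds the string forward in one pass from an up-front length computation instead of A's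
-- consume-and-prepend loop plus left-pad; objective: alternative decomposition (same result).

-- ===== PORT A =====
-- dict {0:'A',1:'C',2:'G',3:'T'} lookup; the loop only looks up seqint & 3 with seqint > 0, so keys 0..3
def nucDict (k : Nat) : Char :=
  match k with
  | 0 => 'A' | 1 => 'C' | 2 => 'G' | 3 => 'T' | _ => 'A'

-- the while loop: seq = nucleotides[seqint & 3] + seq; seqint >>= 2  (on seqint > 0, &3 = mod 4, >>2 = floordiv 4)
def itoseqLoop (seqint : Int) (seq : List Char) : List Char :=
  if h : seqint > 0 then
    itoseqLoop (PySem.Int.floordiv seqint 4) (nucDict (PySem.Int.mod seqint 4).toNat :: seq)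
  else seq
termination_by seqint.toNat
decreasing_by
  rw [PySem.Int.floordiv_eq_ediv_of_pos (by omega)]
  omega

def itoseq (seqint : Int) (kmer : Int) : String :=
  let seq := itoseqLoop seqint []
  let seq := if (seq.length : Int) < kmer then List.replicate (kmer - seq.length).toNat 'A' ++ seq else seq
  String.mk seq

-- ===== PORT B =====
-- "ACGT"[d] for d = 0..3
def nucIdx (d : Nat) : Char :=
  if d = 1 then 'C' else if d = 2 then 'G' else if d = 3 then 'T' else 'A'

-- the digit-count loop: while m > 0: digits += 1; m >>= 2  (on Nat; >>2 = /4)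
def countDigits (m : Nat) : Nat :=
  if m = 0 then 0 else countDigits (m / 4) + 1
decreasing_by omega

def itoseq_alt (seqint : Int) (kmer : Int) : String :=
  let n : Nat := if seqint > 0 then seqint.toNat else 0
  let digits : Nat := countDigits n
  let length : Int := max kmer (digits : Int)
  -- join over range(length): "ACGT"[(n >> (2*(length-1-i))) & 3]
  String.mk ((List.range length.toNat).map (fun i => nucIdx ((n / 4 ^ (length.toNat - 1 - i)) % 4)))

-- ===== PRECONDITION & SPEC =====
def Spec_itoseq (seqint : Int) (kmer : Int) (out : String) : Prop := out = itoseq_alt seqint kmer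
instance (seqint : Int) (kmer : Int) (out : String) : Decidable (Spec_itoseq seqint kmer out) := by unfold Spec_itoseq; infer_instance

-- ===== CLAIM (what is proved, stated in full; the proofs are below) =====
def Claim_equal_itoseq : Prop := ∀ (seqint : Int) (kmer : Int), Dom_itoseq seqint kmer → Spec_itoseq seqint kmer (itoseq seqint kmer)

-- ===== LEMMAS AND PROOFS =====

-- big-endian base-4 digit string of n, the common value both loops compute
def digits4 (n : Nat) : List Char :=
  if n = 0 then [] else digits4 (n / 4) ++ [nucIdx (n % 4)]
decreasing_by omega

theorem digits4_zero : digits4 0 = [] := by rw [digits4]; simp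

theorem digits4_pos (n : Nat) (h : n ≠ 0) :
    digits4 n = digits4 (n / 4) ++ [nucIdx (n % 4)] := by
  rw [digits4]; simp [h]

theorem nucDict_eq_nucIdx (k : Nat) (h : k < 4) : nucDict k = nucIdx k := by
  interval_cases k <;> rfl

theorem itoseqLoop_eq (s : Int) (acc : List Char) :
    itoseqLoop s acc = digits4 (if s > 0 then s.toNat else 0) ++ acc := by
  by_cases h : s > 0
  · rw [itoseqLoop]
    simp only [h, if_pos, dif_pos]
    have hfd : PySem.Int.floordiv s 4 = ((s.toNat / 4 : Nat) : Int) := by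
      rw [PySem.Int.floordiv_eq_ediv_of_pos (by omega)]
      omega
    have hmd : (PySem.Int.mod s 4).toNat = s.toNat % 4 := by
      rw [PySem.Int.mod_eq_emod_of_pos (by omega)]
      omega
    rw [hfd, hmd]
    rw [itoseqLoop_eq ((s.toNat / 4 : Nat) : Int) _]
    rw [nucDict_eq_nucIdx _ (Nat.mod_lt _ (by omega))]
    have harg : (if ((s.toNat / 4 : Nat) : Int) > 0 then ((s.toNat / 4 : Nat) : Int).toNat else 0)
        = s.toNat / 4 := by split <;> omega
    rw [harg, digits4_pos s.toNat (by omega)]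
    simp
  · rw [itoseqLoop]
    simp [h, digits4]
termination_by s.toNat

theorem length_digits4 (n : Nat) : (digits4 n).length = countDigits n := by
  rw [digits4, countDigits]
  by_cases h : n = 0
  · simp [h]
  · simp [h, length_digits4 (n / 4)]
decreasing_by omega

theorem countDigits_pos_rec (n : Nat) (h : n ≠ 0) :
    countDigits n = countDigits (n / 4) + 1 := by
  rw [countDigits]; simp [h]

-- B's forward pass equals left 'A'-padding followed by the digit string
theorem range_map_eq (L : Nat) : ∀ (n : Nat), countDigits n ≤ L →
    (List.range L).map (fun i => nucIdx ((n / 4 ^ (L - 1 - i)) % 4)) =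
      List.replicate (L - countDigits n) 'A' ++ digits4 n := by
  induction L with
  | zero =>
    intro n h
    have hn : n = 0 := by
      by_contra hne
      rw [countDigits_pos_rec n hne] at h; omega
    simp [hn, digits4]
  | succ L ih =>
    intro n h
    rw [List.range_succ, List.map_append]
    have hlast : (List.map (fun i => nucIdx ((n / 4 ^ (L + 1 - 1 - i)) % 4)) [L]) = [nucIdx (n % 4)] := by
      simp
    rw [hlast]
    have hcongr : (List.range L).map (fun i => nucIdx ((n / 4 ^ (L + 1 - 1 - i)) % 4)) =
        (List.range L).map (fun i => nucIdx (((n / 4) / 4 ^ (L - 1 - i)) % 4)) := by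
      apply List.map_congr_left
      intro i hi
      have hiL : i < L := List.mem_range.mp hi
      have he : L + 1 - 1 - i = (L - 1 - i) + 1 := by omega
      rw [he, pow_succ, Nat.mul_comm, ← Nat.div_div_eq_div_mul]
    rw [hcongr]
    by_cases hn : n = 0
    · subst hn
      have h0 : countDigits 0 = 0 := by rw [countDigits]; simp
      rw [ih 0 (by omega)]
      simp [h0, digits4_zero, nucIdx, List.replicate_succ']
    · rw [ih (n / 4) (by rw [countDigits_pos_rec n hn] at h; omega)]
      rw [countDigits_pos_rec n hn]
      rw [digits4_pos n hn,
        show L + 1 - (countDigits (n / 4) + 1) = L - countDigits (n / 4) from by omega]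
      simp

-- ===== VERDICT (by name: the statement is the Claim_ definition above) =====
theorem itoseq_spec : Claim_equal_itoseq := by
  intro seqint kmer _
  unfold Spec_itoseq itoseq itoseq_alt
  dsimp only
  rw [itoseqLoop_eq seqint [], List.append_nil]
  set n : Nat := if seqint > 0 then seqint.toNat else 0 with hn
  have hlen : (digits4 n).length = countDigits n := length_digits4 n
  have hL : (max kmer ((countDigits n : Nat) : Int)).toNat = max kmer.toNat (countDigits n) := by
    omega
  rw [hL, range_map_eq _ n (le_max_right _ _)]
  by_cases hk : ((digits4 n).length : Int) < kmer
  · rw [if_pos hk]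
    rw [show (kmer - ((digits4 n).length : Int)).toNat
          = max kmer.toNat (countDigits n) - countDigits n from by omega]
  · rw [if_neg hk]
    rw [show max kmer.toNat (countDigits n) - countDigits n = 0 from by omega,
        List.replicate_zero, List.nil_append]
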